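-- pv_equiv track=rewrite | github.com/cccorn/Q-ATPG | lib/libspd.py | pauli_int2str
-- ===== SOURCE A (Python) =====
-- def int2bin(x):
--     if x==0:
--         return []
--     result=[]
--     while(True):
--         if x==0:
--             break
--         else:
--             result.insert(0,x%2)
--         x=x//2
--     return result
--
-- def pauli_int2str(pauli,n):
--     pauli_bin=int2bin(pauli)
--     pauli_bin=([0]*(2*n-len(pauli_bin)))+pauli_bin
--     out=''
--     for ii in range(n):
--         if pauli_bin[ii*2:ii*2+2]==[0,0]:
--             out+='I'
--         elif pauli_bin[ii*2:ii*2+2]==[0,1]: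
--             out+='Z'
--         elif pauli_bin[ii*2:ii*2+2]==[1,0]:
--             out+='X'
--         elif pauli_bin[ii*2:ii*2+2]==[1,1]:
--             out+='Y'
--     return out
-- ===== SOURCE B (Python) =====
-- def pauli_int2str(pauli, n):
--     # Read the i-th base-4 digit (most significant first) off with a shift
--     # and mask, and map it through the letter table.
--     return ''.join("IZXY"[(pauli >> (2 * (n - 1 - ii))) & 3] for ii in range(n))
-- ===== Notes on version B (the rewrite author's own statement) =====
-- stated objective: faster
-- what changed: B drops the explicit bit-list construction (int2bin, padding, per-position list slices and list comparisons) and extracts each 2-bit group directly with a shift and mask through the table "IZXY"; Pre_ excludes negative pauli (A's int2bin loop diverges) and pauli with more than 2n bits, where A's missing padding makes the slices read only the top bits of the number, an accident of its implementation.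
-- outside the precondition, e.g. on pauli_int2str(5, 1): A returns 'X', B returns 'Z'
import Mathlib
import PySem

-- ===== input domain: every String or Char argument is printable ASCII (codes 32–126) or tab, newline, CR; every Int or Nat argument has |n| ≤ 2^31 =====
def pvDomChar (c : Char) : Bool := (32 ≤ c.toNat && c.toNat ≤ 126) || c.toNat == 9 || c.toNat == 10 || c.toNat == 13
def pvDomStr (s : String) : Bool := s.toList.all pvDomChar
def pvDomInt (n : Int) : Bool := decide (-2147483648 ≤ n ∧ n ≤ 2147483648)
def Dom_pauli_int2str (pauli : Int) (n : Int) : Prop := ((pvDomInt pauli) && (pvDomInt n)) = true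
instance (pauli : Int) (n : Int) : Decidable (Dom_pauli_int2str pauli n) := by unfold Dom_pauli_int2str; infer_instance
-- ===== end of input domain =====

-- B replaces A's explicit bit-list construction (int2bin, zero-padding, per-position
-- list slices) by direct shift-and-mask extraction of each 2-bit group; constant-factor
-- speed-up.

-- ===== PORT A =====
-- the while-loop of int2bin; Python's guard is `x == 0`, and for negative x the Python
-- loop never terminates — the `x ≤ 0` guard here differs only on those diverging inputs,
-- which Pre_ excludes.
def int2binGo (x : Int) (result : List Int) : List Int :=
  if x ≤ 0 then result
  else int2binGo (PySem.Int.floordiv x 2) (PySem.Int.mod x 2 :: result)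
termination_by x.toNat
decreasing_by rw [PySem.Int.floordiv_eq_ediv_of_pos (by omega)]; omega

def int2bin (x : Int) : List Int :=
  if x = 0 then [] else int2binGo x []

def pauli_int2str (pauli : Int) (n : Int) : String :=
  let pauli_bin0 := int2bin pauli
  let pauli_bin := List.replicate (2 * n - PySem.List.len pauli_bin0).toNat (0 : Int) ++ pauli_bin0
  (PySem.List.pyRange 0 n 1).foldl (fun out ii =>
    if PySem.List.slice pauli_bin (some (ii * 2)) (some (ii * 2 + 2)) = [0, 0] then out ++ "I"
    else if PySem.List.slice pauli_bin (some (ii * 2)) (some (ii * 2 + 2)) = [0, 1] then out ++ "Z"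
    else if PySem.List.slice pauli_bin (some (ii * 2)) (some (ii * 2 + 2)) = [1, 0] then out ++ "X"
    else if PySem.List.slice pauli_bin (some (ii * 2)) (some (ii * 2 + 2)) = [1, 1] then out ++ "Y"
    else out) ""

-- ===== PORT B =====
-- ''.join of one-character strings is String.ofList of the characters; the shift amount
-- 2*(n-1-ii) is never negative for ii in range(n), so `.toNat` is exact there;
-- "IZXY"[g] with g = v & 3 ∈ [0,4) never raises, so the `.getD` default is unreachable.
def pauli_int2str_alt (pauli : Int) (n : Int) : String :=
  String.ofList ((PySem.List.pyRange 0 n 1).map (fun ii =>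
    (PySem.Str.pyGet? "IZXY"
      (PySem.Int.band (pauli >>> (2 * (n - 1 - ii)).toNat) 3)).getD '?'))

-- ===== PRECONDITION & SPEC =====
-- Pre_ excludes negative pauli, on which A's int2bin while-loop never terminates, and
-- (for n > 0) pauli with more than 2n bits — a Pauli operator on n qubits has at most
-- 2n bits, and on larger pauli A's missing padding makes its slices read only the top
-- bits of the number, an accident of its implementation.
def Pre_pauli_int2str (pauli : Int) (n : Int) : Prop :=
  0 ≤ pauli ∧ (n ≤ 0 ∨ (PySem.Int.bitLength pauli : Int) ≤ 2 * n)
instance (pauli : Int) (n : Int) : Decidable (Pre_pauli_int2str pauli n) := by unfold Pre_pauli_int2str; infer_instance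
def pvWitness_pauli_int2str : Int × Int := (6, 2)
def Spec_pauli_int2str (pauli : Int) (n : Int) (out : String) : Prop := out = pauli_int2str_alt pauli n
instance (pauli : Int) (n : Int) (out : String) : Decidable (Spec_pauli_int2str pauli n out) := by unfold Spec_pauli_int2str; infer_instance

-- ===== CLAIM (what is proved, stated in full; the proofs are below) =====
def Claim_equal_pauli_int2str : Prop := ∀ (pauli : Int) (n : Int), Dom_pauli_int2str pauli n → Pre_pauli_int2str pauli n → Spec_pauli_int2str pauli n (pauli_int2str pauli n)

-- ===== LEMMAS AND PROOFS =====

-- Nat-level mirror of int2bin: binary digits of m, MSB first.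
def binList (m : Nat) : List Int :=
  if m = 0 then [] else binList (m / 2) ++ [((m % 2 : Nat) : Int)]
decreasing_by omega

theorem binList_pos (m : Nat) (h : 0 < m) :
    binList m = binList (m / 2) ++ [((m % 2 : Nat) : Int)] := by
  rw [binList]; simp [Nat.pos_iff_ne_zero.mp h]

theorem int2binGo_eq (m : Nat) : ∀ acc, int2binGo (m : Int) acc = binList m ++ acc := by
  induction m using Nat.strong_induction_on with
  | _ m ih =>
    intro acc
    rw [int2binGo]
    by_cases h : m = 0
    · subst h; simp [binList]
    · have hpos : ¬ ((m : Int) ≤ 0) := by omega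
      have hfd : PySem.Int.floordiv (m : Int) 2 = ((m / 2 : Nat) : Int) := by
        exact_mod_cast PySem.Int.floordiv_natCast m 2
      have hmd : PySem.Int.mod (m : Int) 2 = ((m % 2 : Nat) : Int) := by
        exact_mod_cast PySem.Int.mod_natCast m 2
      rw [if_neg hpos, hfd, hmd, ih (m / 2) (by omega), binList_pos m (by omega)]
      simp

theorem int2bin_eq (m : Nat) : int2bin (m : Int) = binList m := by
  by_cases h : m = 0
  · subst h; simp [int2bin, binList]
  · rw [int2bin, if_neg (by omega), int2binGo_eq]; simp

theorem binList_length (m : Nat) : (binList m).length = PySem.Int.bitLength (m : Int) := by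
  induction m using Nat.strong_induction_on with
  | _ m ih =>
    by_cases h : m = 0
    · subst h; simp [binList, PySem.Int.bitLength_zero]
    · rw [binList_pos m (by omega), PySem.Int.bitLength_natCast (by omega)]
      simp [ih (m / 2) (by omega)]

theorem binList_lt (m : Nat) : m < 2 ^ (binList m).length := by
  rw [binList_length]
  simpa using PySem.Int.lt_two_pow_bitLength (m : Int)

-- binList m written positionally: digit j is (m / 2^(L-1-j)) % 2, MSB first.
theorem binList_eq_map (m : Nat) :
    binList m = (List.range (binList m).length).map
      (fun j => ((m / 2 ^ ((binList m).length - 1 - j) % 2 : Nat) : Int)) := by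
  induction m using Nat.strong_induction_on with
  | _ m ih =>
    by_cases h : m = 0
    · subst h; simp [binList]
    · rw [binList_pos m (by omega)]
      have hlen : (binList (m / 2) ++ [((m % 2 : Nat) : Int)]).length
          = (binList (m / 2)).length + 1 := by simp
      rw [hlen]
      set L' := (binList (m / 2)).length with hL'
      rw [List.range_succ, List.map_append]
      congr 1
      · rw [ih (m / 2) (by omega)]
        apply List.map_congr_left
        intro j hj
        rw [List.mem_range] at hj
        have : L' + 1 - 1 - j = (L' - 1 - j) + 1 := by omega
        rw [this, pow_succ, Nat.div_div_eq_div_mul m 2 (2 ^ (L' - 1 - j))]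
        ring_nf
      · simp

-- first two elements of a drop
theorem take_two_drop {α : Type} (l : List α) (j : Nat) (h : j + 1 < l.length) :
    (l.drop j).take 2 = [l[j], l[j + 1]] := by
  apply List.ext_getElem
  · simp; omega
  · intro i h1 h2
    have hi2 : i < 2 := by simp at h1; omega
    interval_cases i <;> simp [List.getElem_take, List.getElem_drop]

-- the character both programs emit for 2-bit group value v
def letterOf (v : Nat) : Char :=
  if v = 0 then 'I' else if v = 1 then 'Z' else if v = 2 then 'X' else 'Y'

theorem pyGet_IZXY (v : Nat) (hv : v < 4) :
    (PySem.Str.pyGet? "IZXY" ((v : Nat) : Int)).getD '?' = letterOf v := by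
  interval_cases v <;> decide

theorem pauli_int2str_spec' (m : Nat) (n : Int)
    (hfit : n ≤ 0 ∨ (PySem.Int.bitLength (m : Int) : Int) ≤ 2 * n) :
    pauli_int2str (m : Int) n = pauli_int2str_alt (m : Int) n := by
  by_cases hn : n ≤ 0
  · rw [pauli_int2str, pauli_int2str_alt, PySem.List.pyRange_one_eq_nil hn]
    rfl
  -- n > 0, so m fits in 2n bits
  have hL2n : ((binList m).length : Int) ≤ 2 * n := by
    rw [binList_length]; omega
  set L := (binList m).length with hLdef
  set pad := (2 * n - (L : Int)).toNat with hpad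
  set W := pad + L with hW
  have hW2n : (W : Int) = 2 * n := by simp only [hW, hpad]; push_cast; omega
  have hmlt : m < 2 ^ L := binList_lt m
  -- the padded list and its positional description
  have hpb : List.replicate (2 * n - PySem.List.len (int2bin (m : Int))).toNat (0 : Int)
        ++ int2bin (m : Int)
      = List.replicate pad (0 : Int) ++ binList m := by
    rw [int2bin_eq]; simp [hpad, hLdef]
  have hget : ∀ j, (hj : j < W) →
      (List.replicate pad (0 : Int) ++ binList m)[j]'(by simpa [hW, hLdef] using hj)
        = ((m / 2 ^ (W - 1 - j) % 2 : Nat) : Int) := by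
    intro j hj
    by_cases hjp : j < pad
    · rw [List.getElem_append_left (by simpa using hjp)]
      have : m / 2 ^ (W - 1 - j) = 0 :=
        Nat.div_eq_of_lt (lt_of_lt_of_le hmlt (Nat.pow_le_pow_right (by omega) (by omega)))
      simp [this]
    · rw [List.getElem_append_right (by simpa using hjp)]
      rw [List.getElem_of_eq (binList_eq_map m) (by simp [List.length_replicate]; omega)]
      rw [List.getElem_map, List.getElem_range]
      have : (binList m).length - 1 - (j - (List.replicate pad (0:Int)).length) = W - 1 - j := by
        simp only [List.length_replicate]
        rw [← hLdef]; omega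
      rw [this]
  -- the per-position character
  have hchar : ∀ k : Nat, k < n.toNat →
      ∀ out : String,
      (if PySem.List.slice (List.replicate pad (0:Int) ++ binList m)
            (some (((k : Int)) * 2)) (some (((k : Int)) * 2 + 2)) = [0, 0] then out ++ "I"
       else if PySem.List.slice (List.replicate pad (0:Int) ++ binList m)
            (some (((k : Int)) * 2)) (some (((k : Int)) * 2 + 2)) = [0, 1] then out ++ "Z"
       else if PySem.List.slice (List.replicate pad (0:Int) ++ binList m)
            (some (((k : Int)) * 2)) (some (((k : Int)) * 2 + 2)) = [1, 0] then out ++ "X"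
       else if PySem.List.slice (List.replicate pad (0:Int) ++ binList m)
            (some (((k : Int)) * 2)) (some (((k : Int)) * 2 + 2)) = [1, 1] then out ++ "Y"
       else out)
      = out ++ String.ofList [letterOf (m / 2 ^ (W - 2 - 2 * k) % 4)] := by
    intro k hk out
    have h2k : ((k : Int)) * 2 = ((2 * k : Nat) : Int) := by push_cast; ring
    have h2k2 : ((k : Int)) * 2 + 2 = ((2 * k + 2 : Nat) : Int) := by push_cast; ring
    rw [h2k2, h2k, PySem.List.slice_natCast]
    have hkW : 2 * k + 1 < W := by
      have : (k : Int) < n := by omega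
      omega
    rw [show 2 * k + 2 - 2 * k = 2 by omega,
        take_two_drop _ (2 * k) (by simp; omega),
        hget (2 * k) (by omega), hget (2 * k + 1) (by omega)]
    set t := m / 2 ^ (W - 2 - 2 * k) with ht
    have ha : m / 2 ^ (W - 1 - 2 * k) = t / 2 := by
      rw [ht, Nat.div_div_eq_div_mul, ← pow_succ]
      congr 2; omega
    rw [show W - 1 - (2 * k + 1) = W - 2 - 2 * k by omega, ha, ← ht]
    rcases (show t % 4 = 0 ∨ t % 4 = 1 ∨ t % 4 = 2 ∨ t % 4 = 3 by omega) with h4 | h4 | h4 | h4 <;>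
      · have hhi : t / 2 % 2 = t % 4 / 2 := by omega
        have hlo : t % 2 = t % 4 % 2 := by omega
        rw [hhi, hlo, h4]
        simp [letterOf, String.ofList]
        decide
  -- fold the A-side loop into a map
  have hfold : ∀ (l : List Int) (f : String → Int → String) (g : Int → Char),
      (∀ s ii, ii ∈ l → f s ii = s ++ String.ofList [g ii]) →
      ∀ s, l.foldl f s = s ++ String.ofList (l.map g) := by
    intro l f g hfg
    induction l with
    | nil => intro s; simp
    | cons a l ihl =>
      intro s
      rw [List.foldl_cons, hfg s a (by simp),
          ihl (fun s ii h => hfg s ii (by simp [h]))]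
      rw [String.append_assoc, ← String.ofList_append]; rfl
  -- now compute both sides
  unfold pauli_int2str pauli_int2str_alt
  simp only []
  rw [hpb]
  rw [hfold _ _ (fun ii => letterOf (m / 2 ^ (W - 2 - 2 * ii.toNat) % 4))
      (by
        intro s ii hii
        rw [PySem.List.mem_pyRange_one] at hii
        have hk : ii = ((ii.toNat : Nat) : Int) := by omega
        have hkn : ii.toNat < n.toNat := by omega
        calc _ = _ := by rw [hk]; exact hchar ii.toNat hkn s)]
  have hempty : ("" : String) ++
      String.ofList ((PySem.List.pyRange 0 n 1).map
        (fun ii => letterOf (m / 2 ^ (W - 2 - 2 * ii.toNat) % 4)))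
      = String.ofList ((PySem.List.pyRange 0 n 1).map
        (fun ii => letterOf (m / 2 ^ (W - 2 - 2 * ii.toNat) % 4))) := by
    simp
  rw [hempty]
  congr 1
  apply List.map_congr_left
  intro ii hii
  rw [PySem.List.mem_pyRange_one] at hii
  set k := ii.toNat with hkdef
  have hsh : (2 * (n - 1 - ii)).toNat = W - 2 - 2 * k := by
    simp only [hkdef]; omega
  rw [hsh]
  have hshift : ((m : Int) >>> (W - 2 - 2 * k)) = ((m >>> (W - 2 - 2 * k) : Nat) : Int) := by
    simp
  rw [hshift]
  have hband : PySem.Int.band ((m >>> (W - 2 - 2 * k) : Nat) : Int) 3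
      = (((m >>> (W - 2 - 2 * k)) &&& 3 : Nat) : Int) := by
    exact_mod_cast PySem.Int.band_natCast (m >>> (W - 2 - 2 * k)) 3
  rw [hband]
  have hmask : (m >>> (W - 2 - 2 * k)) &&& 3 = m / 2 ^ (W - 2 - 2 * k) % 4 := by
    rw [Nat.shiftRight_eq_div_pow]
    have := Nat.and_two_pow_sub_one_eq_mod (m / 2 ^ (W - 2 - 2 * k)) 2
    norm_num at this; omega
  rw [hmask, pyGet_IZXY _ (by omega)]

-- ===== VERDICT (by name: the statement is the Claim_ definition above) =====
theorem pauli_int2str_spec : Claim_equal_pauli_int2str := by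
  intro pauli n _ hpre
  unfold Spec_pauli_int2str
  unfold Pre_pauli_int2str at hpre
  obtain ⟨hnn, hfit⟩ := hpre
  have hm : pauli = ((pauli.toNat : Nat) : Int) := by omega
  rw [hm]
  apply pauli_int2str_spec' pauli.toNat n
  rw [← hm] at *
  exact hfit
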